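-- pv_equiv track=rewrite | github.com/ljm0850/algo-problem | baekjoon/2602.py | solution
-- ===== SOURCE A (Python) =====
-- def solution(sentence:str,bridge:list[str])->int:
--     # 각 알파벳 idx들 기록
--     alphaTotal = {"R":[],"I":[],"N":[],"G":[],"S":[]}
--     S = len(sentence)
--     for i in range(S):
--         alpha = sentence[i]
--         alphaTotal[alpha].append(i)
--
--     B = len(bridge)
--     L = len(bridge[0])
--     check = [[0]*S for _ in range(B)]
--     for idx in range(L):    # 다리idx
--         temp = list()
--         for i in range(B):  # 어떤 다리인지, 천사 or 악마 다리
--             alpha = bridge[i][idx]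
--             for num in alphaTotal[alpha]:
--                 if num == 0:
--                     temp.append((i,num,1))
--                 else:
--                     value = 0
--                     for v in range(B):
--                         if v == i:continue
--                         value += check[v][num-1]
--                     temp.append((i,num,value))
--         for r,c,cnt in temp:
--             check[r][c] += cnt
--     ansValue = 0
--     for i in range(B):
--         ansValue += check[i][S-1]
--     return ansValue
-- ===== SOURCE B (Python) =====
-- def _prefix(row):
--     # acc[c] = sum of row[:c]
--     acc = [0]
--     for x in row:
--         acc.append(acc[-1] + x)
--     return acc
--
--
-- def solution(sentence: str, bridge: list[str]) -> int:
--     # Sentence-position-driven DP with prefix sums: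
--     # dp[i][c] = number of ways to match sentence[:j+1] with its last
--     # character read on bridge i at column c.
--     S = len(sentence)
--     B = len(bridge)
--     L = len(bridge[0])
--     dp = [[1 if bridge[i][c] == sentence[0] else 0 for c in range(L)]
--           for i in range(B)]
--     for j in range(1, S):
--         pref = [_prefix(row) for row in dp]
--         total = [sum(p[c] for p in pref) for c in range(L + 1)]
--         dp = [[total[c] - pref[i][c] if bridge[i][c] == sentence[j] else 0
--                for c in range(L)]
--               for i in range(B)]
--     return sum(map(sum, dp))
-- ===== Notes on version B (the rewrite author's own statement) =====
-- stated objective: alternative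
-- what changed: A scans bridge columns outermost, buckets sentence positions per letter in a dict, and for each matching position rescans all other bridges' accumulated counts; B runs a sentence-position-outermost DP whose state is the per-(bridge, column) way count of the current prefix, combining all other bridges via prefix sums instead of letter buckets and rescans.
import Mathlib
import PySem

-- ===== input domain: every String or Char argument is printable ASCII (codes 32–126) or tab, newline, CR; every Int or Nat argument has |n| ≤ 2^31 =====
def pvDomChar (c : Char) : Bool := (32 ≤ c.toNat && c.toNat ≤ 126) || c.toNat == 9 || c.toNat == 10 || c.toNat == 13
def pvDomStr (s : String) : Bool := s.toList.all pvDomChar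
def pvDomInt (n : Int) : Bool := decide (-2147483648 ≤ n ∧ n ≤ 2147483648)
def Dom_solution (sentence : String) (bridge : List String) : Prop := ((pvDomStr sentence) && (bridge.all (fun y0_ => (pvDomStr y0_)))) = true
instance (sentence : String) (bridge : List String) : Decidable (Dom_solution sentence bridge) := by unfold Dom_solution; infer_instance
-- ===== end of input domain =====

-- B replaces A's column-major scan (with per-letter position buckets and an O(B) rescan
-- per match) by a sentence-position-major DP over per-column states using prefix sums.

-- ===== PORT A =====
-- Literal port of A.  Python raises (KeyError on a character outside "RINGS",
-- IndexError on an empty sentence/bridge or a bridge string shorter than bridge[0])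
-- exactly on the inputs excluded by Pre_solution; on admitted inputs every
-- pyGetD/pySetD index is in range and Dict.modify hits an existing key, so the
-- total forms used below are exact there.
def solution (sentence : String) (bridge : List String) : Int :=
  let sc := sentence.toList
  let brl := bridge.map (·.toList)
  let alphaTotal : PySem.Dict Char (List Int) :=
    PySem.Dict.ofList [('R',[]),('I',[]),('N',[]),('G',[]),('S',[])]
  let S : Int := PySem.List.len sc
  let alphaTotal := (PySem.List.pyRange 0 S 1).foldl
    (fun d i => d.modify (PySem.List.pyGetD sc i ' ') [] (· ++ [i])) alphaTotal
  let B : Int := PySem.List.len bridge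
  let L : Int := PySem.List.len (PySem.List.pyGetD brl 0 [])
  let check : List (List Int) :=
    (PySem.List.pyRange 0 B 1).map (fun _ => List.replicate S.toNat (0:Int))
  let check := (PySem.List.pyRange 0 L 1).foldl (fun check idx =>
    let temp : List (Int × Int × Int) := (PySem.List.pyRange 0 B 1).foldl (fun temp i =>
      let alpha := PySem.List.pyGetD (PySem.List.pyGetD brl i []) idx ' '
      (alphaTotal.getD alpha []).foldl (fun temp num =>
        if num == 0 then temp ++ [(i, num, (1:Int))]
        else
          let value := (PySem.List.pyRange 0 B 1).foldl (fun value v =>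
            if v == i then value
            else value + PySem.List.pyGetD (PySem.List.pyGetD check v []) (num - 1) 0) 0
          temp ++ [(i, num, value)]) temp) []
    temp.foldl (fun check t =>
      PySem.List.pySetD check t.1
        (PySem.List.pySetD (PySem.List.pyGetD check t.1 []) t.2.1
          (PySem.List.pyGetD (PySem.List.pyGetD check t.1 []) t.2.1 0 + t.2.2))) check) check
  (PySem.List.pyRange 0 B 1).foldl (fun a i =>
    a + PySem.List.pyGetD (PySem.List.pyGetD check i []) (S - 1) 0) 0

-- ===== PORT B =====
-- _prefix of Source B (acc[-1] is exact: acc is never empty)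
def altPrefix (row : List Int) : List Int :=
  row.foldl (fun acc x => acc ++ [PySem.List.pyGetD acc (-1) 0 + x]) [0]

def solution_alt (sentence : String) (bridge : List String) : Int :=
  let sc := sentence.toList
  let brl := bridge.map (·.toList)
  let S : Int := PySem.List.len sc
  let B : Int := PySem.List.len brl
  let L : Int := PySem.List.len (PySem.List.pyGetD brl 0 [])
  let dp : List (List Int) := (PySem.List.pyRange 0 B 1).map (fun i =>
    (PySem.List.pyRange 0 L 1).map (fun c =>
      if PySem.List.pyGetD (PySem.List.pyGetD brl i []) c ' ' = PySem.List.pyGetD sc 0 ' '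
      then (1:Int) else 0))
  let dp := (PySem.List.pyRange 1 S 1).foldl (fun dp j =>
    let pref := dp.map altPrefix
    let total := (PySem.List.pyRange 0 (L+1) 1).map (fun c =>
      (pref.map (fun p => PySem.List.pyGetD p c 0)).sum)
    (PySem.List.pyRange 0 B 1).map (fun i =>
      (PySem.List.pyRange 0 L 1).map (fun c =>
        if PySem.List.pyGetD (PySem.List.pyGetD brl i []) c ' ' = PySem.List.pyGetD sc j ' '
        then PySem.List.pyGetD total c 0 - PySem.List.pyGetD (PySem.List.pyGetD pref i []) c 0
        else 0))) dp
  (dp.map List.sum).sum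

-- ===== PRECONDITION & SPEC =====
def RingsChars : List Char := ['R', 'I', 'N', 'G', 'S']

-- Exactly where A returns: nonempty sentence and bridge list (else IndexError),
-- every sentence character and every inspected bridge character (the first
-- len(bridge[0]) of each bridge string) in "RINGS" (else KeyError), and every
-- bridge string at least as long as bridge[0] (else IndexError).
def Pre_solution (sentence : String) (bridge : List String) : Prop :=
  sentence.toList ≠ [] ∧ bridge ≠ [] ∧
  sentence.toList.all (fun c => RingsChars.contains c) = true ∧
  bridge.all (fun s => decide ((bridge.headD "").toList.length ≤ s.toList.length)) = true ∧
  bridge.all (fun s => (s.toList.take (bridge.headD "").toList.length).all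
    (fun c => RingsChars.contains c)) = true
instance (sentence : String) (bridge : List String) : Decidable (Pre_solution sentence bridge) := by
  unfold Pre_solution; infer_instance

def pvWitness_solution : String × List String := ("RING", ["RINGS", "SGNIR"])

def Spec_solution (sentence : String) (bridge : List String) (out : Int) : Prop := out = solution_alt sentence bridge
instance (sentence : String) (bridge : List String) (out : Int) : Decidable (Spec_solution sentence bridge out) := by unfold Spec_solution; infer_instance

-- ===== CLAIM (what is proved, stated in full; the proofs are below) =====
def Claim_equal_solution : Prop := ∀ (sentence : String) (bridge : List String), Dom_solution sentence bridge → Pre_solution sentence bridge → Spec_solution sentence bridge (solution sentence bridge)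

-- ===== LEMMAS AND PROOFS =====

-- the common mathematical value: ways sc brl j i c = number of ways to read
-- sentence prefix sc[0..j] ending on bridge i at column c
def ways (sc : List Char) (brl : List (List Char)) : Nat → Nat → Nat → Int
  | 0, i, c => if (brl.getD i []).getD c ' ' = sc.getD 0 ' ' then 1 else 0
  | (j+1), i, c =>
    if (brl.getD i []).getD c ' ' = sc.getD (j+1) ' ' then
      ∑ v ∈ (Finset.range brl.length).erase i, ∑ c' ∈ Finset.range c, ways sc brl j v c'
    else 0

def get2 (m : List (List Int)) (i c : Nat) : Int := (m.getD i []).getD c 0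

lemma foldl_range_inv {σ : Type} (n : Nat) (Inv : Nat → σ → Prop) (g : σ → Nat → σ)
    (init : σ) (h0 : Inv 0 init) (hstep : ∀ t s, t < n → Inv t s → Inv (t+1) (g s t)) :
    Inv n ((List.range n).foldl g init) := by
  induction n with
  | zero => simpa using h0
  | succ m ih =>
    rw [List.range_succ, List.foldl_append]
    exact hstep m _ (Nat.lt_succ_self m) (ih (fun t s ht => hstep t s (by omega)))

lemma foldl_pyRange_inv {σ : Type} (a : Int) (n : Nat) (Inv : Nat → σ → Prop)
    (f : σ → Int → σ) (init : σ) (h0 : Inv 0 init)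
    (hstep : ∀ t s, t < n → Inv t s → Inv (t+1) (f s (a + t))) :
    Inv n ((PySem.List.pyRange a (a + n) 1).foldl f init) := by
  rw [PySem.List.pyRange_one, show (a + n - a).toNat = n by omega, List.foldl_map]
  exact foldl_range_inv n Inv _ init h0 hstep

lemma foldl_pyRange_inv0 {σ : Type} (n : Nat) (Inv : Nat → σ → Prop)
    (f : σ → Int → σ) (init : σ) (h0 : Inv 0 init)
    (hstep : ∀ t s, t < n → Inv t s → Inv (t+1) (f s ((0:Int) + t))) :
    Inv n ((PySem.List.pyRange 0 (n:Int) 1).foldl f init) := by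
  have := foldl_pyRange_inv 0 n Inv f init h0 hstep
  rwa [zero_add] at this


def posInts (sc : List Char) (t : Nat) (ch : Char) : List Int :=
  ((List.range t).filter (fun m => sc.getD m ' ' == ch)).map (Nat.cast : Nat → Int)

lemma posInts_succ_pos (sc : List Char) (t : Nat) (ch : Char) (h : sc.getD t ' ' = ch) :
    posInts sc (t+1) ch = posInts sc t ch ++ [(t : Int)] := by
  simp [posInts, List.range_succ, List.getD_eq_getElem?_getD] at *
  simp [h]

lemma posInts_succ_neg (sc : List Char) (t : Nat) (ch : Char) (h : ¬ sc.getD t ' ' = ch) :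
    posInts sc (t+1) ch = posInts sc t ch := by
  simp [List.getD_eq_getElem?_getD] at h
  simp [posInts, List.range_succ, List.getD_eq_getElem?_getD, h]

lemma alphaTotal_spec (sc : List Char) :
    ∀ ch, ((PySem.List.pyRange 0 (PySem.List.len sc) 1).foldl
      (fun d i => d.modify (PySem.List.pyGetD sc i ' ') [] (· ++ [i]))
      (PySem.Dict.ofList [('R',[]),('I',[]),('N',[]),('G',[]),('S',[])])).getD ch []
    = posInts sc sc.length ch := by
  have hlen : PySem.List.len sc = (0 : Int) + sc.length := by
    simp [PySem.List.len_eq]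
  rw [hlen]
  exact foldl_pyRange_inv 0 sc.length
    (fun t (d : PySem.Dict Char (List Int)) => ∀ ch, d.getD ch [] = posInts sc t ch) _ _
    (by intro ch
        show (PySem.Dict.ofList [('R',[]),('I',[]),('N',[]),('G',[]),('S',[])]).getD ch [] = _
        simp only [posInts, List.range_zero, List.filter_nil, List.map_nil]
        simp [PySem.Dict.getD_eq_get?_getD, PySem.Dict.ofList, PySem.Dict.update,
          PySem.Dict.get?, PySem.Dict.insert, PySem.Dict.empty]
        cases h : List.find? (fun p => p.1 == ch)
            [('R',([]:List Int)),('I',[]),('N',[]),('G',[]),('S',[])] with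
        | none => rfl
        | some a =>
          have := List.mem_of_find?_eq_some h
          simp at this
          rcases this with h|h|h|h|h <;> simp [h])
    (by intro t d ht ih ch
        show (d.modify (PySem.List.pyGetD sc ((0:Int) + t) ' ') [] (· ++ [(0:Int) + t])).getD ch []
          = posInts sc (t+1) ch
        have hz : ((0 : Int) + t) = ((t : Nat) : Int) := by omega
        rw [hz, PySem.Dict.getD_modify]
        simp only [PySem.List.pyGetD_natCast]
        by_cases h : ch = sc.getD t ' '
        · subst h
          rw [posInts_succ_pos sc t _ rfl]
          simp [ih]
        · have h' : ¬ ch = sc[t]?.getD ' ' := by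
            simpa [List.getD_eq_getElem?_getD] using h
          rw [posInts_succ_neg sc t ch (fun hh => h hh.symm)]
          simp [h', ih])


lemma getD_map_lt {α β : Type} (f : α → β) (l : List α) (i : Nat) (d : α) (d' : β)
    (h : i < l.length) : (l.map f).getD i d' = f (l.getD i d) := by
  rw [List.getD_eq_getElem?_getD, List.getD_eq_getElem?_getD, List.getElem?_map,
    List.getElem?_eq_getElem h]
  rfl

lemma sum_map_eq_finset {α : Type} (g : α → Int) (l : List α) (d : α) :
    (l.map g).sum = ∑ i ∈ Finset.range l.length, g (l.getD i d) := by
  induction l with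
  | nil => simp
  | cons x r ih =>
    simp only [List.map_cons, List.sum_cons, List.length_cons, Finset.sum_range_succ',
      List.getD_cons_succ, List.getD_cons_zero, ih]
    ring

lemma sum_range_map (g : Nat → Int) (n : Nat) :
    ((List.range n).map g).sum = ∑ i ∈ Finset.range n, g i := by
  rw [sum_map_eq_finset g _ 0, List.length_range]
  exact Finset.sum_congr rfl (fun i hi => by
    rw [List.getD_eq_getElem?_getD, List.getElem?_range (Finset.mem_range.mp hi)]; rfl)

def prefTail (s : Int) : List Int → List Int
  | [] => []
  | x :: r => (s + x) :: prefTail (s + x) r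

lemma prefTail_getD (row : List Int) : ∀ (s : Int) (c : Nat), c < row.length →
    (prefTail s row).getD c 0 = s + ∑ c' ∈ Finset.range (c+1), row.getD c' 0 := by
  induction row with
  | nil => intro s c h; simp at h
  | cons x r ih =>
    intro s c h
    cases c with
    | zero => simp [prefTail]
    | succ c =>
      have := ih (s + x) c (by simpa using h)
      simp only [prefTail, List.getD_cons_succ, this, Finset.sum_range_succ']
      simp only [List.getD_cons_succ, List.getD_cons_zero]
      ring

lemma altPrefix_foldl (row : List Int) : ∀ (acc : List Int) (h : acc ≠ []),
    row.foldl (fun acc x => acc ++ [PySem.List.pyGetD acc (-1) 0 + x]) acc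
      = acc ++ prefTail (acc.getLast h) row := by
  induction row with
  | nil => intro acc h; simp [prefTail]
  | cons x r ih =>
    intro acc h
    rw [List.foldl_cons, PySem.List.pyGetD_neg_one acc 0 h,
      ih (acc ++ [acc.getLast h + x]) (by simp)]
    simp [prefTail, List.getLast_append]

lemma altPrefix_getD (row : List Int) (c : Nat) (hc : c ≤ row.length) :
    (altPrefix row).getD c 0 = ∑ c' ∈ Finset.range c, row.getD c' 0 := by
  unfold altPrefix
  rw [altPrefix_foldl row [0] (by simp)]
  cases c with
  | zero => simp
  | succ c =>
    have hlt : c < row.length := by omega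
    simp only [List.getLast_singleton, List.singleton_append, List.getD_cons_succ]
    rw [prefTail_getD row 0 c hlt]
    simp


lemma getD_map_pyRange {α : Type} (f : Int → α) (n k : Nat) (d : α) (h : k < n) :
    ((PySem.List.pyRange 0 (n : Int) 1).map f).getD k d = f (k : Int) := by
  rw [← PySem.List.pyGetD_natCast]
  exact PySem.List.pyGetD_map_pyRange f n k d h

def InvB (sc : List Char) (brl : List (List Char)) (L : Nat) (j : Nat)
    (dp : List (List Int)) : Prop :=
  dp.length = brl.length ∧ (∀ i, i < brl.length → (dp.getD i []).length = L) ∧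
  (∀ i, i < brl.length → ∀ c, c < L → get2 dp i c = ways sc brl j i c)

lemma length_map_pyRange {α : Type} (f : Int → α) (n : Nat) :
    ((PySem.List.pyRange 0 (n : Int) 1).map f).length = n := by
  rw [List.length_map, PySem.List.length_pyRange_one]
  omega

lemma initB (sc : List Char) (brl : List (List Char)) (L : Nat) :
    InvB sc brl L 0
      ((PySem.List.pyRange 0 (brl.length : Int) 1).map fun i =>
        (PySem.List.pyRange 0 (L : Int) 1).map fun c =>
          if PySem.List.pyGetD (PySem.List.pyGetD brl i []) c ' ' = PySem.List.pyGetD sc 0 ' '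
          then (1 : Int) else 0) := by
  refine ⟨length_map_pyRange _ _, fun i hi => ?_, fun i hi c hc => ?_⟩
  · rw [getD_map_pyRange _ _ _ _ hi, length_map_pyRange]
  · unfold get2
    rw [getD_map_pyRange _ _ _ _ hi, getD_map_pyRange _ _ _ _ hc]
    simp only [PySem.List.pyGetD_natCast, PySem.List.pyGetD_zero]
    rfl

lemma stepB (sc : List Char) (brl : List (List Char)) (L : Nat) (t : Nat)
    (dp : List (List Int)) (h : InvB sc brl L t dp) :
    InvB sc brl L (t+1)
      ((PySem.List.pyRange 0 (brl.length : Int) 1).map fun i =>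
        (PySem.List.pyRange 0 (L : Int) 1).map fun c =>
          if PySem.List.pyGetD (PySem.List.pyGetD brl i []) c ' ' = PySem.List.pyGetD sc (1 + (t : Int)) ' '
          then PySem.List.pyGetD ((PySem.List.pyRange 0 ((L : Int) + 1) 1).map fun c' =>
                 ((dp.map altPrefix).map fun p => PySem.List.pyGetD p c' 0).sum) c 0
               - PySem.List.pyGetD (PySem.List.pyGetD (dp.map altPrefix) i []) c 0
          else 0) := by
  obtain ⟨hlen, hrow, hval⟩ := h
  refine ⟨length_map_pyRange _ _, fun i hi => ?_, fun i hi c hc => ?_⟩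
  · rw [getD_map_pyRange _ _ _ _ hi, length_map_pyRange]
  · unfold get2
    rw [getD_map_pyRange _ _ _ _ hi, getD_map_pyRange _ _ _ _ hc]
    simp only [get2] at hval
    have hc1 : (1 + (t : Int)) = ((t + 1 : Nat) : Int) := by push_cast; ring
    rw [hc1]
    simp only [PySem.List.pyGetD_natCast]
    have hP : ∀ i', i' < brl.length →
        ((dp.map altPrefix).getD i' []).getD c 0
          = ∑ c' ∈ Finset.range c, ways sc brl t i' c' := by
      intro i' hi'
      rw [getD_map_lt altPrefix dp i' [] [] (by omega)]
      rw [altPrefix_getD _ c (by rw [hrow i' hi']; omega)]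
      exact Finset.sum_congr rfl (fun c' hc' =>
        hval i' hi' c' (Nat.lt_trans (Finset.mem_range.mp hc') hc))
    have hT : (((PySem.List.pyRange 0 ((L : Int) + 1) 1).map fun c' =>
          ((dp.map altPrefix).map fun p => PySem.List.pyGetD p c' 0).sum)).getD c 0
        = ∑ i' ∈ Finset.range brl.length, ∑ c' ∈ Finset.range c, ways sc brl t i' c' := by
      have hcast : ((L : Int) + 1) = ((L + 1 : Nat) : Int) := by push_cast; ring
      rw [hcast, getD_map_pyRange _ (L+1) c 0 (by omega)]
      simp only [PySem.List.pyGetD_natCast]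
      rw [sum_map_eq_finset _ _ [], List.length_map, hlen]
      exact Finset.sum_congr rfl (fun i' hi' => hP i' (Finset.mem_range.mp hi'))
    rw [hT, hP i hi]
    simp only [ways]
    by_cases hm : (brl.getD i []).getD c ' ' = sc.getD (t+1) ' '
    · rw [if_pos hm, if_pos hm, Finset.sum_erase_eq_sub (Finset.mem_range.mpr hi)]
    · rw [if_neg hm, if_neg hm]


def bodyB (sc : List Char) (brl : List (List Char)) (dp : List (List Int)) (j : Int) :
    List (List Int) :=
  let pref := dp.map altPrefix
  let total := (PySem.List.pyRange 0 (PySem.List.len (PySem.List.pyGetD brl 0 []) + 1) 1).map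
    (fun c => (pref.map (fun p => PySem.List.pyGetD p c 0)).sum)
  (PySem.List.pyRange 0 (PySem.List.len brl) 1).map (fun i =>
    (PySem.List.pyRange 0 (PySem.List.len (PySem.List.pyGetD brl 0 [])) 1).map (fun c =>
      if PySem.List.pyGetD (PySem.List.pyGetD brl i []) c ' ' = PySem.List.pyGetD sc j ' '
      then PySem.List.pyGetD total c 0 - PySem.List.pyGetD (PySem.List.pyGetD pref i []) c 0
      else 0))

def dp0B (sc : List Char) (brl : List (List Char)) : List (List Int) :=
  (PySem.List.pyRange 0 (PySem.List.len brl) 1).map (fun i =>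
    (PySem.List.pyRange 0 (PySem.List.len (PySem.List.pyGetD brl 0 [])) 1).map (fun c =>
      if PySem.List.pyGetD (PySem.List.pyGetD brl i []) c ' ' = PySem.List.pyGetD sc 0 ' '
      then (1:Int) else 0))

lemma dp0B_cast (sc : List Char) (brl : List (List Char)) :
    dp0B sc brl
      = ((PySem.List.pyRange 0 (brl.length : Int) 1).map fun i =>
          (PySem.List.pyRange 0 (((brl.getD 0 []).length : Nat) : Int) 1).map fun c =>
            if PySem.List.pyGetD (PySem.List.pyGetD brl i []) c ' ' = PySem.List.pyGetD sc 0 ' '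
            then (1 : Int) else 0) := by
  simp only [dp0B, PySem.List.len_eq, PySem.List.pyGetD_zero]

lemma bodyB_cast (sc : List Char) (brl : List (List Char)) (dp : List (List Int)) (j : Int) :
    bodyB sc brl dp j
      = ((PySem.List.pyRange 0 (brl.length : Int) 1).map fun i =>
          (PySem.List.pyRange 0 (((brl.getD 0 []).length : Nat) : Int) 1).map fun c =>
            if PySem.List.pyGetD (PySem.List.pyGetD brl i []) c ' ' = PySem.List.pyGetD sc j ' '
            then PySem.List.pyGetD ((PySem.List.pyRange 0 ((((brl.getD 0 []).length : Nat) : Int) + 1) 1).map fun c' =>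
                   ((dp.map altPrefix).map fun p => PySem.List.pyGetD p c' 0).sum) c 0
                 - PySem.List.pyGetD (PySem.List.pyGetD (dp.map altPrefix) i []) c 0
            else 0) := by
  simp only [bodyB, PySem.List.len_eq, PySem.List.pyGetD_zero]

def rhsVal (sentence : String) (bridge : List String) : Int :=
  ∑ i ∈ Finset.range (bridge.map (·.toList)).length,
    ∑ c ∈ Finset.range ((bridge.map (·.toList)).getD 0 []).length,
      ways sentence.toList (bridge.map (·.toList)) (sentence.toList.length - 1) i c

lemma sum_eq_finset (l : List Int) : l.sum = ∑ c ∈ Finset.range l.length, l.getD c 0 := by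
  have := sum_map_eq_finset id l 0
  simpa using this

lemma B_eval (sentence : String) (bridge : List String) (hsc : sentence.toList ≠ []) :
    solution_alt sentence bridge = rhsVal sentence bridge := by
  have hrfl : solution_alt sentence bridge
      = ((((PySem.List.pyRange 1 (PySem.List.len sentence.toList) 1).foldl
          (bodyB sentence.toList (bridge.map (·.toList)))
          (dp0B sentence.toList (bridge.map (·.toList)))).map List.sum).sum) := rfl
  rw [hrfl]
  have hS1 : 1 ≤ sentence.toList.length := List.length_pos_iff.mpr hsc
  have hcast : PySem.List.len sentence.toList
      = 1 + ((sentence.toList.length - 1 : Nat) : Int) := by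
    simp only [PySem.List.len_eq]; omega
  rw [hcast]
  have hinv := foldl_pyRange_inv 1 (sentence.toList.length - 1)
    (InvB sentence.toList (bridge.map (·.toList)) ((bridge.map (·.toList)).getD 0 []).length)
    (bodyB sentence.toList (bridge.map (·.toList)))
    (dp0B sentence.toList (bridge.map (·.toList)))
    (by rw [dp0B_cast]; exact initB _ _ _)
    (by intro t s ht hs; rw [bodyB_cast]; exact stepB _ _ _ t s hs)
  obtain ⟨hlen, hrow, hval⟩ := hinv
  simp only [get2] at hval
  rw [sum_map_eq_finset List.sum _ [], hlen]
  unfold rhsVal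
  refine Finset.sum_congr rfl (fun i hi => ?_)
  have hi' := Finset.mem_range.mp hi
  rw [sum_eq_finset, hrow i hi']
  exact Finset.sum_congr rfl (fun c hc => hval i hi' c (Finset.mem_range.mp hc))


-- ---------- A-side proof machinery ----------

lemma getD_set (l : List (List Int)) (r i : Nat) (v : List Int) (hr : r < l.length) :
    (l.set r v).getD i [] = if i = r then v else l.getD i [] := by
  rw [List.getD_eq_getElem?_getD, List.getD_eq_getElem?_getD, List.getElem?_set]
  by_cases h : i = r
  · subst h; simp [hr]
  · have h2 : r ≠ i := fun hh => h hh.symm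
    simp [h, h2]

def app1 (check : List (List Int)) (t : Int × Int × Int) : List (List Int) :=
  PySem.List.pySetD check t.1
    (PySem.List.pySetD (PySem.List.pyGetD check t.1 []) t.2.1
      (PySem.List.pyGetD (PySem.List.pyGetD check t.1 []) t.2.1 0 + t.2.2))

def tsumA (temp : List (Int × Int × Int)) (i m : Nat) : Int :=
  ((temp.filter (fun p => p.1 == (i:Int) && p.2.1 == (m:Int))).map (fun p => p.2.2)).sum

lemma tsum_nil (i m : Nat) : tsumA [] i m = 0 := rfl

lemma tsum_append (l1 l2 : List (Int × Int × Int)) (i m : Nat) :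
    tsumA (l1 ++ l2) i m = tsumA l1 i m + tsumA l2 i m := by
  simp [tsumA, List.filter_append]

lemma app1_spec (check : List (List Int)) (r c : Nat) (w : Int)
    (hr : r < check.length) (hc : c < (check.getD r []).length) :
    (app1 check ((r:Int), (c:Int), w)).length = check.length ∧
    (∀ i, (app1 check ((r:Int), (c:Int), w)).getD i [] =
      if i = r then (check.getD r []).set c ((check.getD r []).getD c 0 + w)
      else check.getD i []) := by
  unfold app1
  simp only [PySem.List.pySetD_natCast, PySem.List.pyGetD_natCast]
  exact ⟨by simp, fun i => getD_set check r i _ hr⟩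

lemma applyTemp_spec (Bn Sn : Nat) :
    ∀ (temp : List (Int × Int × Int)) (check : List (List Int))
      (hlen : check.length = Bn) (hrow : ∀ i, i < Bn → (check.getD i []).length = Sn)
      (htemp : ∀ p ∈ temp, ∃ r c : Nat, r < Bn ∧ c < Sn ∧ p.1 = (r:Int) ∧ p.2.1 = (c:Int)),
      (temp.foldl app1 check).length = Bn ∧
      (∀ i, i < Bn → ((temp.foldl app1 check).getD i []).length = Sn) ∧
      (∀ i, i < Bn → ∀ m, m < Sn →
        get2 (temp.foldl app1 check) i m = get2 check i m + tsumA temp i m) := by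
  intro temp
  induction temp with
  | nil => intro check hlen hrow _; exact ⟨hlen, hrow, fun i hi m hm => by simp [tsum_nil]⟩
  | cons p rest ih =>
    intro check hlen hrow htemp
    obtain ⟨r, c, hrB, hcS, hp1, hp2⟩ := htemp p (List.mem_cons_self)
    have hp : p = ((r:Int), (c:Int), p.2.2) := by
      obtain ⟨a, b, w⟩ := p; simp_all
    have hr' : r < check.length := by omega
    have hc' : c < (check.getD r []).length := by rw [hrow r hrB]; omega
    have happ := app1_spec check r c p.2.2 hr' hc'
    have hlen' : (app1 check ((r:Int), (c:Int), p.2.2)).length = Bn := by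
      rw [happ.1, hlen]
    have hrow' : ∀ i, i < Bn → ((app1 check ((r:Int), (c:Int), p.2.2)).getD i []).length = Sn := by
      intro i hi
      rw [happ.2 i]
      by_cases h : i = r
      · rw [if_pos h, List.length_set]; exact hrow r hrB
      · rw [if_neg h]; exact hrow i hi
    have := ih (app1 check ((r:Int), (c:Int), p.2.2)) hlen' hrow'
      (fun q hq => htemp q (List.mem_cons_of_mem _ hq))
    rw [← hp] at this
    rw [List.foldl_cons]
    refine ⟨this.1, this.2.1, fun i hi m hm => ?_⟩
    rw [this.2.2 i hi m hm]
    have hget : get2 (app1 check ((r:Int), (c:Int), p.2.2)) i m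
        = get2 check i m + (if i = r ∧ m = c then p.2.2 else 0) := by
      unfold get2
      rw [happ.2 i]
      by_cases h1 : i = r
      · subst h1
        rw [if_pos rfl]
        by_cases h2 : m = c
        · subst h2
          have hc2 : m < (check[i]?.getD []).length := by
            simpa [List.getD_eq_getElem?_getD] using hc'
          simp [List.getD_eq_getElem?_getD, hc2]
        · simp only [h2, and_false, if_false, if_true, true_and]
          rw [List.getD_eq_getElem?_getD, List.getElem?_set_ne (fun hh => h2 hh.symm),
            ← List.getD_eq_getElem?_getD]
          simp [h2]
      · simp [h1]
    have htsum : tsumA (p :: rest) i m = (if i = r ∧ m = c then p.2.2 else 0) + tsumA rest i m := by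
      rw [hp]
      simp only [tsumA, List.filter_cons]
      by_cases h1 : i = r
      · by_cases h2 : m = c
        · subst h1; subst h2
          simp [tsumA]
        · have hne : ¬ (((c:Int)) == ((m:Int))) = true := by
            simp only [beq_iff_eq, Nat.cast_inj]; exact fun hh => h2 hh.symm
          simp [tsumA, hne, h2]
      · have hne : ¬ (((r:Int)) == ((i:Int))) = true := by
          simp only [beq_iff_eq, Nat.cast_inj]; exact fun hh => h1 hh.symm
        simp [tsumA, hne, h1]
    rw [htsum, hp, hget]
    ring


lemma foldl_skip (Bn i : Nat) (g : Int → Int) :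
    (PySem.List.pyRange 0 (Bn:Int) 1).foldl
      (fun acc v => if v == (i:Int) then acc else acc + g v) 0
      = ∑ v ∈ (Finset.range Bn).erase i, g (v:Int) := by
  rw [PySem.List.pyRange_one, show ((Bn:Int) - 0).toNat = Bn by omega, List.foldl_map]
  have hcong : ∀ (acc : Int), ∀ k ∈ List.range Bn,
      (if ((0:Int) + (k:Int)) == (i:Int) then acc else acc + g (0 + (k:Int)))
        = acc + (if k = i then 0 else g (k:Int)) := by
    intro acc k _
    simp only [zero_add]
    by_cases h : k = i
    · subst h; simp
    · have hne : ¬ (((k:Nat):Int) == ((i:Nat):Int)) = true := by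
        simp only [beq_iff_eq, Nat.cast_inj]; exact h
      simp [hne, h]
  rw [PySem.List.foldl_congr_mem (List.range Bn) _ _ 0 hcong]
  rw [PySem.List.foldl_add, sum_range_map, zero_add]
  have hze : (fun k => if k = i then 0 else g (k:Int)) i = 0 := by simp
  rw [← Finset.sum_erase (Finset.range Bn)
    (f := fun k => if k = i then 0 else g (k:Int)) (a := i) hze]
  exact Finset.sum_congr rfl (fun k hk => by simp [Finset.ne_of_mem_erase hk])

lemma filter_eq_nodup (m : Nat) : ∀ (l : List Nat), l.Nodup →
    l.filter (fun x => x == m) = if m ∈ l then [m] else [] := by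
  intro l
  induction l with
  | nil => intro _; simp
  | cons x r ih =>
    intro hl
    rcases List.nodup_cons.mp hl with ⟨hx, hr⟩
    rw [List.filter_cons]
    by_cases h : x = m
    · subst h
      have hnil : r.filter (fun y => y == x) = [] :=
        List.filter_eq_nil_iff.mpr (fun a ha => by
          simp only [beq_iff_eq]; exact fun hh => hx (hh ▸ ha))
      simp [hnil]
    · have h2 : ¬ m = x := fun hh => h hh.symm
      simp [h, h2, ih hr]

lemma tsumA_flatMap (n : Nat) (seg : Nat → List (Int × Int × Int)) (i m : Nat) :
    tsumA ((List.range n).flatMap seg) i m = ∑ k ∈ Finset.range n, tsumA (seg k) i m := by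
  induction n with
  | zero => simp [tsumA]
  | succ q ih =>
    rw [List.range_succ, List.flatMap_append, tsum_append, ih, Finset.sum_range_succ]
    simp [tsumA]

lemma tsumA_map_ne (i k m : Nat) (hne : k ≠ i) (l : List Int) (f : Int → Int) :
    tsumA (l.map (fun num => ((k:Int), num, f num))) i m = 0 := by
  unfold tsumA
  rw [List.filter_map]
  have hf : ∀ num : Int, ((fun p : Int × Int × Int => p.1 == (i:Int) && p.2.1 == (m:Int)) ∘
      (fun num => ((k:Int), num, f num))) num = false := by
    intro num
    simp only [Function.comp_apply, beq_iff_eq, Nat.cast_inj]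
    simp [hne]
  rw [List.filter_congr (fun x _ => hf x)]
  simp

lemma tsumA_map_nat (l : List Nat) (F : Nat → Int × Int × Int) (i m : Nat) :
    tsumA (l.map F) i m
      = ((l.filter (fun x => (F x).1 == (i:Int) && (F x).2.1 == (m:Int))).map
          (fun x => (F x).2.2)).sum := by
  unfold tsumA
  simp [List.filter_map, List.map_map, Function.comp_def]

lemma tsumA_seg_self (sc : List Char) (Sn i m : Nat) (hm : m < Sn) (ch : Char) (f : Int → Int) :
    tsumA ((posInts sc Sn ch).map (fun num => ((i:Int), num, f num))) i m
      = if sc.getD m ' ' == ch then f (m:Int) else 0 := by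
  unfold posInts
  rw [List.map_map, tsumA_map_nat]
  simp only [Function.comp_apply]
  have hpred : ∀ x ∈ (List.range Sn).filter (fun mm => sc.getD mm ' ' == ch),
      ((((i:Nat):Int) == ((i:Nat):Int)) && (((x:Nat):Int) == ((m:Nat):Int))) = (x == m) := by
    intro x _
    by_cases h : x = m
    · subst h; simp
    · have h1 : (((x:Nat):Int) == ((m:Nat):Int)) = false := by simp [h]
      have h2 : (x == m) = false := by simp [h]
      simp [h1, h2]
  rw [List.filter_congr hpred]
  rw [filter_eq_nodup m _ ((List.nodup_range).filter _)]
  simp only [List.mem_filter, List.mem_range]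
  by_cases hq : sc[m]?.getD ' ' = ch
  · simp [hm, hq, List.getD_eq_getElem?_getD]
  · simp [hq, List.getD_eq_getElem?_getD]


def bodyA (brl : List (List Char)) (aT : PySem.Dict Char (List Int)) (B : Int)
    (check : List (List Int)) (idx : Int) : List (List Int) :=
  let temp : List (Int × Int × Int) := (PySem.List.pyRange 0 B 1).foldl (fun temp i =>
    let alpha := PySem.List.pyGetD (PySem.List.pyGetD brl i []) idx ' '
    (aT.getD alpha []).foldl (fun temp num =>
      if num == 0 then temp ++ [(i, num, (1:Int))]
      else
        let value := (PySem.List.pyRange 0 B 1).foldl (fun value v =>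
          if v == i then value
          else value + PySem.List.pyGetD (PySem.List.pyGetD check v []) (num - 1) 0) 0
        temp ++ [(i, num, value)]) temp) []
  temp.foldl (fun check t =>
    PySem.List.pySetD check t.1
      (PySem.List.pySetD (PySem.List.pyGetD check t.1 []) t.2.1
        (PySem.List.pyGetD (PySem.List.pyGetD check t.1 []) t.2.1 0 + t.2.2))) check

def aTofA (sc : List Char) : PySem.Dict Char (List Int) :=
  (PySem.List.pyRange 0 (PySem.List.len sc) 1).foldl
    (fun d i => d.modify (PySem.List.pyGetD sc i ' ') [] (· ++ [i]))
    (PySem.Dict.ofList [('R',[]),('I',[]),('N',[]),('G',[]),('S',[])])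

lemma aTofA_getD (sc : List Char) (ch : Char) :
    (aTofA sc).getD ch [] = posInts sc sc.length ch := alphaTotal_spec sc ch

def InvA (sc : List Char) (brl : List (List Char)) (t : Nat)
    (check : List (List Int)) : Prop :=
  check.length = brl.length ∧ (∀ i, i < brl.length → (check.getD i []).length = sc.length) ∧
  (∀ i, i < brl.length → ∀ m, m < sc.length →
    get2 check i m = ∑ c ∈ Finset.range t, ways sc brl m i c)

lemma stepA (sc : List Char) (brl : List (List Char)) (t : Nat)
    (check : List (List Int)) (h : InvA sc brl t check) :
    InvA sc brl (t+1) (bodyA brl (aTofA sc) (brl.length : Int) check (t : Int)) := by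
  obtain ⟨hlen, hrow, hval⟩ := h
  -- abbreviations
  set Bn := brl.length with hBn
  set Sn := sc.length with hSn
  -- per-bridge column character and count value
  set chA : Nat → Char := fun k => (brl.getD k []).getD t ' ' with hchA
  set cnt : Nat → Int → Int := fun k num =>
    if num == 0 then (1:Int)
    else (PySem.List.pyRange 0 (Bn:Int) 1).foldl (fun value v =>
      if v == (k:Int) then value
      else value + PySem.List.pyGetD (PySem.List.pyGetD check v []) (num - 1) 0) 0 with hcnt
  set seg : Nat → List (Int × Int × Int) := fun k =>
    (posInts sc Sn (chA k)).map (fun num => ((k:Int), num, cnt k num)) with hseg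
  have htemp_eq : (PySem.List.pyRange 0 (Bn:Int) 1).foldl (fun temp i =>
      ((aTofA sc).getD (PySem.List.pyGetD (PySem.List.pyGetD brl i []) (t:Int) ' ') []).foldl
        (fun temp num =>
          if num == 0 then temp ++ [(i, num, (1:Int))]
          else temp ++ [(i, num,
            (PySem.List.pyRange 0 (Bn:Int) 1).foldl (fun value v =>
              if v == i then value
              else value + PySem.List.pyGetD (PySem.List.pyGetD check v []) (num - 1) 0) 0)])
        temp) []
      = (List.range Bn).flatMap seg := by
    refine foldl_pyRange_inv0 Bn (fun t' s => s = (List.range t').flatMap seg) _ [] rfl ?_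
    intro k s hk hs
    show _ = (List.range (k+1)).flatMap seg
    have hz : ((0:Int) + (k:Int)) = ((k:Nat):Int) := by ring
    rw [hz]
    simp only [PySem.List.pyGetD_natCast]
    rw [aTofA_getD, ← hSn]
    have hinner : ∀ (acc2 : List (Int × Int × Int)),
        ∀ num ∈ posInts sc Sn ((brl.getD k []).getD t ' '),
        (if (num == (0:Int)) = true then acc2 ++ [(((k:Nat):Int), num, (1:Int))]
         else acc2 ++ [(((k:Nat):Int), num,
           (PySem.List.pyRange 0 (Bn:Int) 1).foldl (fun value v =>
             if v == ((k:Nat):Int) then value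
             else value + PySem.List.pyGetD (PySem.List.pyGetD check v []) (num - 1) 0) 0)])
        = acc2 ++ [(((k:Nat):Int), num,
            if (num == (0:Int)) = true then (1:Int)
            else (PySem.List.pyRange 0 (Bn:Int) 1).foldl (fun value v =>
              if v == ((k:Nat):Int) then value
              else value + PySem.List.pyGetD (PySem.List.pyGetD check v []) (num - 1) 0) 0)] := by
      intro acc2 num _
      by_cases hnum : (num == (0:Int)) = true
      · simp [hnum]
      · simp [hnum]
    rw [PySem.List.foldl_congr_mem _ _ _ _ hinner]
    rw [PySem.List.foldl_append_singleton_eq_map]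
    rw [hs, List.range_succ, List.flatMap_append]
    rw [show List.flatMap seg [k] = seg k from by simp]
  have hmem_seg : ∀ p ∈ (List.range Bn).flatMap seg,
      ∃ r c : Nat, r < Bn ∧ c < Sn ∧ p.1 = (r:Int) ∧ p.2.1 = (c:Int) := by
    intro p hp
    obtain ⟨k, hk, hpk⟩ := List.mem_flatMap.mp hp
    obtain ⟨num, hnum, hpe⟩ := List.mem_map.mp hpk
    obtain ⟨mm, hmm, hme⟩ := List.mem_map.mp hnum
    refine ⟨k, mm, List.mem_range.mp hk, ?_, ?_, ?_⟩
    · exact List.mem_range.mp (List.mem_filter.mp hmm).1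
    · rw [← hpe]
    · rw [← hpe, ← hme]
  have happly := applyTemp_spec Bn Sn ((List.range Bn).flatMap seg) check hlen hrow hmem_seg
  have hbody : bodyA brl (aTofA sc) (Bn:Int) check (t:Int)
      = ((List.range Bn).flatMap seg).foldl app1 check := by
    simp only [bodyA]
    rw [htemp_eq]
    rfl
  rw [hbody]
  refine ⟨happly.1, happly.2.1, fun i hi m hm => ?_⟩
  rw [happly.2.2 i hi m hm, hval i hi m hm]
  -- compute the temp-sum at (i, m)
  have hts : tsumA ((List.range Bn).flatMap seg) i m = ways sc brl m i t := by
    rw [tsumA_flatMap]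
    rw [Finset.sum_eq_single_of_mem i (Finset.mem_range.mpr hi)
      (fun k _ hk => by rw [hseg]; exact tsumA_map_ne i k m hk _ _)]
    rw [hseg]
    rw [tsumA_seg_self sc Sn i m hm (chA i) (cnt i)]
    cases m with
    | zero =>
      by_cases hc : sc.getD 0 ' ' = chA i
      · have hb : (sc.getD 0 ' ' == chA i) = true := by simpa using hc
        rw [if_pos hb]
        have h1 : cnt i ((0:Nat):Int) = 1 := by simp [hcnt]
        rw [h1]
        have hb2' : (brl[i]?.getD [])[t]?.getD ' ' = sc[0]?.getD ' ' := by
          simpa [List.getD_eq_getElem?_getD] using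
            (show (brl.getD i []).getD t ' ' = sc.getD 0 ' ' from hc.symm)
        simp [ways, List.getD_eq_getElem?_getD, hb2']
      · have hb : ¬ (sc.getD 0 ' ' == chA i) = true := by simpa using hc
        rw [if_neg hb]
        have hb2' : ¬ (brl[i]?.getD [])[t]?.getD ' ' = sc[0]?.getD ' ' := by
          simpa [List.getD_eq_getElem?_getD] using
            (show ¬ (brl.getD i []).getD t ' ' = sc.getD 0 ' ' from fun hh => hc hh.symm)
        simp [ways, List.getD_eq_getElem?_getD, hb2']
    | succ m' =>
      have hnz : ¬ (((m'+1:Nat):Int) == (0:Int)) = true := by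
        simp only [beq_iff_eq]
        omega
      by_cases hc : sc.getD (m'+1) ' ' = chA i
      · have hb : (sc.getD (m'+1) ' ' == chA i) = true := by simpa using hc
        simp only [hb, if_true, hcnt, hnz, if_false]
        rw [foldl_skip Bn i (fun v => PySem.List.pyGetD
          (PySem.List.pyGetD check v []) (((m'+1:Nat):Int) - 1) 0)]
        have hb2 : (brl.getD i []).getD t ' ' = sc.getD (m'+1) ' ' := hc.symm
        simp only [ways, hb2, if_true]
        refine Finset.sum_congr rfl (fun v hv => ?_)
        have hvB : v < Bn := Finset.mem_range.mp (Finset.mem_of_mem_erase hv)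
        have hidx : (((m'+1:Nat):Int) - 1) = ((m':Nat):Int) := by push_cast; ring
        rw [hidx]
        simp only [PySem.List.pyGetD_natCast]
        have := hval v hvB m' (by omega)
        simp only [get2] at this
        rw [this]
      · have hb : ¬ (sc.getD (m'+1) ' ' == chA i) = true := by simpa using hc
        rw [if_neg hb]
        have hb2' : ¬ (brl[i]?.getD [])[t]?.getD ' ' = sc[m'+1]?.getD ' ' := by
          simpa [List.getD_eq_getElem?_getD] using
            (show ¬ (brl.getD i []).getD t ' ' = sc.getD (m'+1) ' ' from fun hh => hc hh.symm)
        simp [ways, List.getD_eq_getElem?_getD, hb2']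
  rw [hts, Finset.sum_range_succ]


set_option maxHeartbeats 4000000 in
lemma A_eval (sentence : String) (bridge : List String) (hsc : sentence.toList ≠ []) :
    solution sentence bridge = rhsVal sentence bridge := by
  have hrfl : solution sentence bridge
      = (PySem.List.pyRange 0 (PySem.List.len bridge) 1).foldl
          (fun a i => a + PySem.List.pyGetD (PySem.List.pyGetD
            ((PySem.List.pyRange 0
                (PySem.List.len (PySem.List.pyGetD (bridge.map (·.toList)) 0 [])) 1).foldl
              (bodyA (bridge.map (·.toList)) (aTofA sentence.toList) (PySem.List.len bridge))
              ((PySem.List.pyRange 0 (PySem.List.len bridge) 1).map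
                (fun _ => List.replicate (PySem.List.len sentence.toList).toNat (0:Int))))
            i []) (PySem.List.len sentence.toList - 1) 0) 0 := rfl
  rw [hrfl]
  have hS1 : 1 ≤ sentence.toList.length := List.length_pos_iff.mpr hsc
  have hB : PySem.List.len bridge = (((bridge.map (·.toList)).length : Nat) : Int) := by
    simp [PySem.List.len_eq]
  have hL : PySem.List.len (PySem.List.pyGetD (bridge.map (·.toList)) 0 [])
      = ((((bridge.map (·.toList)).getD 0 []).length : Nat) : Int) := by
    simp [PySem.List.len_eq, PySem.List.pyGetD_zero]
  have hS : PySem.List.len sentence.toList = ((sentence.toList.length : Nat) : Int) := by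
    simp [PySem.List.len_eq]
  rw [hB, hL, hS]
  have h0 : InvA sentence.toList (bridge.map (·.toList)) 0
      ((PySem.List.pyRange 0 (((bridge.map (·.toList)).length : Nat) : Int) 1).map
        (fun _ => List.replicate ((sentence.toList.length : Int)).toNat (0:Int))) := by
    refine ⟨length_map_pyRange _ _, fun i hi => ?_, fun i hi m hm => ?_⟩
    · rw [getD_map_pyRange _ _ _ _ hi]
      simp
    · unfold get2
      rw [getD_map_pyRange _ _ _ _ hi]
      simp [List.getD_eq_getElem?_getD, List.getElem?_replicate, hm]
      split <;> rfl
  have hinv := foldl_pyRange_inv0 ((bridge.map (·.toList)).getD 0 []).length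
    (InvA sentence.toList (bridge.map (·.toList)))
    (bodyA (bridge.map (·.toList)) (aTofA sentence.toList)
      (((bridge.map (·.toList)).length : Nat) : Int))
    _ h0 (by
      intro t s ht hs
      have hz : ((0:Int) + (t:Int)) = ((t:Nat):Int) := by ring
      rw [hz]
      exact stepA sentence.toList (bridge.map (·.toList)) t s hs)
  obtain ⟨hlen, hrow, hval⟩ := hinv
  simp only [get2] at hval
  rw [PySem.List.pyRange_one,
    show (((((bridge.map (·.toList)).length : Nat) : Int)) - 0).toNat
      = (bridge.map (·.toList)).length by omega, List.foldl_map]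
  rw [PySem.List.pyRange_one 0 (((bridge.map (·.toList)).length : Nat) : Int)] at hval
  rw [show (((((bridge.map (·.toList)).length : Nat) : Int)) - 0).toNat
    = (bridge.map (·.toList)).length by omega] at hval
  rw [PySem.List.foldl_add, sum_range_map, zero_add]
  unfold rhsVal
  refine Finset.sum_congr rfl (fun k hk => ?_)
  have hkB := Finset.mem_range.mp hk
  have hz : ((0:Int) + (k:Int)) = ((k:Nat):Int) := by ring
  rw [hz]
  have hidx : ((sentence.toList.length : Int) - 1)
      = ((sentence.toList.length - 1 : Nat) : Int) := by omega
  rw [hidx]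
  simp only [PySem.List.pyGetD_natCast]
  rw [hval k hkB (sentence.toList.length - 1) (by omega)]

-- ===== VERDICT (by name: the statement is the Claim_ definition above) =====
theorem solution_spec : Claim_equal_solution := by
  intro sentence bridge _ hpre
  unfold Spec_solution
  have hsc : sentence.toList ≠ [] := hpre.1
  rw [A_eval sentence bridge hsc, B_eval sentence bridge hsc]
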